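-- pv_equiv track=rewrite | github.com/GHuss7/UTRP_PhD_Code | DSS_UTNDP_Functions.py | get_common_terminal_vertices_pairs
-- ===== SOURCE A (Python) =====
-- def get_common_terminal_vertices_pairs(routes_R):
--     """A function to get all the pairs of the terminal vertices in a route set
--     """
--     # Get terminal nodes
--     tf = [x[0] for x in routes_R] #get all terminal nodes in the first position
--     tb = [x[-1] for x in routes_R] #get all terminal nodes in the last position
--
--     fb=[] # list for keeping the front to back matches
--     ff=[] # list for keeping the front to front matches
--     bb=[] # list for keeping the back to back matches
--
--     for i in range(len(tf)):
--         for j in range(len(tf)):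
--
--             if tf[i] == tb[j]:
--                 fb.append((i,j))
--
--             if i < j:
--                 if tf[i] == tf[j]:
--                     ff.append((i,j))
--
--                 if tb[i] == tb[j]:
--                     bb.append((i,j))
--
--     return {'fb':fb, 'ff':ff, 'bb':bb}
-- ===== SOURCE B (Python) =====
-- def get_common_terminal_vertices_pairs(routes_R):
--     """Group indices by terminal value once, then emit matching pairs per
--     value, instead of comparing every (i, j) pair."""
--     tf = [x[0] for x in routes_R]
--     tb = [x[-1] for x in routes_R]
--     by_tf = {}
--     by_tb = {}
--     for j in range(len(routes_R)):
--         by_tf.setdefault(tf[j], []).append(j)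
--         by_tb.setdefault(tb[j], []).append(j)
--     fb = [(i, j) for i, v in enumerate(tf) for j in by_tb.get(v, [])]
--     ff = [(i, j) for i, v in enumerate(tf) for j in by_tf[v] if i < j]
--     bb = [(i, j) for i, v in enumerate(tb) for j in by_tb[v] if i < j]
--     return {'fb': fb, 'ff': ff, 'bb': bb}
-- ===== Notes on version B (the rewrite author's own statement) =====
-- stated objective: faster
-- what changed: Replaces the all-pairs double loop with one pass that groups indices by terminal value in dicts, then emits only the matching pairs per value.
import Mathlib
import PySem

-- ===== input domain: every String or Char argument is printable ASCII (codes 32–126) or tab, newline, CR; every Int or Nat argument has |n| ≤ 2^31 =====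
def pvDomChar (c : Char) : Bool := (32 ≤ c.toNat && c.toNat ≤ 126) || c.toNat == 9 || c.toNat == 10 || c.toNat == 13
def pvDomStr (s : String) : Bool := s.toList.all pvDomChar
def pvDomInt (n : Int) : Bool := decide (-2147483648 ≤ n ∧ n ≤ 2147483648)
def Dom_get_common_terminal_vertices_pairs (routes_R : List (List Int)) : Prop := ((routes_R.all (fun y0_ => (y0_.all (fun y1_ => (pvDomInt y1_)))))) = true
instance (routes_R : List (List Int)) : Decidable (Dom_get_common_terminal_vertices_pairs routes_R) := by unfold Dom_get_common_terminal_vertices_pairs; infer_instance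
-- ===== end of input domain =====

-- B groups indices by terminal value in one pass and emits matching pairs per value (O(n + output))
-- instead of A's all-pairs double loop (O(n^2)).

-- ===== PORT A =====
def get_common_terminal_vertices_pairs (routes_R : List (List Int)) : List (String × List (Int × Int)) :=
  let tf := routes_R.map (fun x => PySem.List.pyGetD x 0 0)       -- x[0]; Pre_ excludes empty routes
  let tb := routes_R.map (fun x => PySem.List.pyGetD x (-1) 0)    -- x[-1]
  let s := (PySem.List.pyRange 0 tf.length 1).foldl (fun (s : List (Int × Int) × List (Int × Int) × List (Int × Int)) i =>
    (PySem.List.pyRange 0 tf.length 1).foldl (fun s j =>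
      let fb := if PySem.List.pyGetD tf i 0 == PySem.List.pyGetD tb j 0 then s.1 ++ [(i, j)] else s.1
      let ff := if i < j && PySem.List.pyGetD tf i 0 == PySem.List.pyGetD tf j 0 then s.2.1 ++ [(i, j)] else s.2.1
      let bb := if i < j && PySem.List.pyGetD tb i 0 == PySem.List.pyGetD tb j 0 then s.2.2 ++ [(i, j)] else s.2.2
      (fb, ff, bb)) s) ([], [], [])
  [("fb", s.1), ("ff", s.2.1), ("bb", s.2.2)]

-- ===== PORT B =====
-- setdefault(v, []).append(j) leaves the dict with d[v] = d.get(v, []) + [j]: ported exactly as Dict.modify v [] (· ++ [j]).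
def get_common_terminal_vertices_pairs_alt (routes_R : List (List Int)) : List (String × List (Int × Int)) :=
  let tf := routes_R.map (fun x => PySem.List.pyGetD x 0 0)
  let tb := routes_R.map (fun x => PySem.List.pyGetD x (-1) 0)
  let d := (PySem.List.pyRange 0 routes_R.length 1).foldl
      (fun (d : PySem.Dict Int (List Int) × PySem.Dict Int (List Int)) j =>
        (d.1.modify (PySem.List.pyGetD tf j 0) [] (· ++ [j]),
         d.2.modify (PySem.List.pyGetD tb j 0) [] (· ++ [j])))
      (PySem.Dict.empty, PySem.Dict.empty)
  let by_tf := d.1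
  let by_tb := d.2
  let fb := (PySem.List.enumerate tf 0).flatMap (fun p => (by_tb.getD p.2 []).map (fun j => (p.1, j)))
  let ff := (PySem.List.enumerate tf 0).flatMap (fun p => ((by_tf.getD p.2 []).filter (fun j => p.1 < j)).map (fun j => (p.1, j)))
  let bb := (PySem.List.enumerate tb 0).flatMap (fun p => ((by_tb.getD p.2 []).filter (fun j => p.1 < j)).map (fun j => (p.1, j)))
  [("fb", fb), ("ff", ff), ("bb", bb)]

-- ===== PRECONDITION & SPEC =====
-- Pre_ excludes route sets containing an empty route, on which Python A raises IndexError (x[0]).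
def Pre_get_common_terminal_vertices_pairs (routes_R : List (List Int)) : Prop := ∀ x ∈ routes_R, x ≠ []
instance (routes_R : List (List Int)) : Decidable (Pre_get_common_terminal_vertices_pairs routes_R) := by unfold Pre_get_common_terminal_vertices_pairs; infer_instance
def pvWitness_get_common_terminal_vertices_pairs : List (List Int) := [[1, 2, 3], [3, 4, 1], [1, 5]]
def Spec_get_common_terminal_vertices_pairs (routes_R : List (List Int)) (out : List (String × List (Int × Int))) : Prop := out = get_common_terminal_vertices_pairs_alt routes_R
instance (routes_R : List (List Int)) (out : List (String × List (Int × Int))) : Decidable (Spec_get_common_terminal_vertices_pairs routes_R out) := by unfold Spec_get_common_terminal_vertices_pairs; infer_instance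

-- ===== CLAIM (what is proved, stated in full; the proofs are below) =====
def Claim_equal_get_common_terminal_vertices_pairs : Prop := ∀ (routes_R : List (List Int)), Dom_get_common_terminal_vertices_pairs routes_R → Pre_get_common_terminal_vertices_pairs routes_R → Spec_get_common_terminal_vertices_pairs routes_R (get_common_terminal_vertices_pairs routes_R)

-- ===== LEMMAS AND PROOFS =====

-- A's inner loop over j appends, per component, the matching (i, j) pairs.
theorem pvA_inner (l : List Int) (p q r : Int → Bool) (i : Int)
    (s : List (Int × Int) × List (Int × Int) × List (Int × Int)) :
    l.foldl (fun s j =>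
      ((if p j then s.1 ++ [(i, j)] else s.1),
       (if q j then s.2.1 ++ [(i, j)] else s.2.1),
       (if r j then s.2.2 ++ [(i, j)] else s.2.2))) s
    = (s.1 ++ (l.filter p).map (fun j => (i, j)),
       s.2.1 ++ (l.filter q).map (fun j => (i, j)),
       s.2.2 ++ (l.filter r).map (fun j => (i, j))) := by
  induction l generalizing s with
  | nil => simp
  | cons a t ih =>
      simp only [List.foldl_cons, ih, List.filter_cons]
      by_cases hp : p a <;> by_cases hq : q a <;> by_cases hr : r a <;>
        simp [hp, hq, hr]

-- A's outer loop is a componentwise flatMap.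
theorem pvA_outer (l : List Int) (F G H : Int → List (Int × Int))
    (s : List (Int × Int) × List (Int × Int) × List (Int × Int)) :
    l.foldl (fun s i => (s.1 ++ F i, s.2.1 ++ G i, s.2.2 ++ H i)) s
    = (s.1 ++ l.flatMap F, s.2.1 ++ l.flatMap G, s.2.2 ++ l.flatMap H) := by
  induction l generalizing s with
  | nil => simp
  | cons a t ih => simp [ih]

-- ===== VERDICT (by name: the statement is the Claim_ definition above) =====
theorem pv_group (key : Int → Int) (l : List Int) (v : Int) :
    (l.foldl (fun d j => d.modify (key j) [] (· ++ [j])) (PySem.Dict.empty : PySem.Dict Int (List Int))).getD v []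
    = l.filter (fun j => key j == v) := by
  rw [← List.foldl_map (f := fun j => ((key j : Int), j))
        (g := fun (d : PySem.Dict Int (List Int)) p => d.modify p.1 [] (· ++ [p.2]))]
  rw [PySem.Dict.getD_foldl_modify_append]
  simp [List.filter_map, Function.comp_def]

theorem pv_group2 (k1 k2 : Int → Int) (l : List Int) :
    l.foldl (fun (d : PySem.Dict Int (List Int) × PySem.Dict Int (List Int)) j =>
        (d.1.modify (k1 j) [] (· ++ [j]), d.2.modify (k2 j) [] (· ++ [j]))) (PySem.Dict.empty, PySem.Dict.empty)
    = (l.foldl (fun d j => d.modify (k1 j) [] (· ++ [j])) PySem.Dict.empty,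
       l.foldl (fun d j => d.modify (k2 j) [] (· ++ [j])) PySem.Dict.empty) :=
  PySem.List.foldl_prod_mk (fun (d : PySem.Dict Int (List Int)) j => d.modify (k1 j) [] (· ++ [j])) (fun (d : PySem.Dict Int (List Int)) j => d.modify (k2 j) [] (· ++ [j])) l _ _

theorem pv_main (routes_R : List (List Int)) :
    get_common_terminal_vertices_pairs routes_R = get_common_terminal_vertices_pairs_alt routes_R := by
  unfold get_common_terminal_vertices_pairs get_common_terminal_vertices_pairs_alt
  simp only [pvA_inner, pvA_outer, List.nil_append,
    PySem.List.enumerate_eq_map_pyRange _ (0 : Int), List.flatMap_map]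
  rw [pv_group2]
  simp only [pv_group, List.filter_filter, List.length_map, PySem.List.len]
  simp only [Bool.beq_comm]

theorem get_common_terminal_vertices_pairs_spec : Claim_equal_get_common_terminal_vertices_pairs := by
  intro routes_R _ _
  exact pv_main routes_R
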